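-- pv_equiv track=rewrite | github.com/danbo1/FYP-Sports-Data-Analysis | Helper.py | xFramesBeforeAndAfter
-- ===== SOURCE A (Python) =====
-- def xFramesBeforeAndAfter(before, matchData, after, mid):
--     # find before stop
--     i = 1
--     while i < before:
--         if mid - (i+1) >= 0:
--             i += 1
--         else:
--             break
--     before = i
--     # find after stop
--     i = 1
--     while i < after:
--         if mid + i <= len(matchData)-1:
--             i += 1
--         else:
--             break
--     after = i
--     # Extract events
--     mod = matchData[(mid - before):(mid + after)]
--     return mod
-- ===== SOURCE B (Python) =====
-- def xFramesBeforeAndAfter(before, matchData, after, mid):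
--     b = max(1, min(before, mid))
--     a = max(1, min(after, len(matchData) - mid))
--     return matchData[mid - b : mid + a]
-- ===== Notes on version B (the rewrite author's own statement) =====
-- stated objective: simpler
-- what changed: Replaces the two counting while-loops with closed-form clamps b = max(1, min(before, mid)) and a = max(1, min(after, len(matchData) - mid)) and a single slice.
import Mathlib
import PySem

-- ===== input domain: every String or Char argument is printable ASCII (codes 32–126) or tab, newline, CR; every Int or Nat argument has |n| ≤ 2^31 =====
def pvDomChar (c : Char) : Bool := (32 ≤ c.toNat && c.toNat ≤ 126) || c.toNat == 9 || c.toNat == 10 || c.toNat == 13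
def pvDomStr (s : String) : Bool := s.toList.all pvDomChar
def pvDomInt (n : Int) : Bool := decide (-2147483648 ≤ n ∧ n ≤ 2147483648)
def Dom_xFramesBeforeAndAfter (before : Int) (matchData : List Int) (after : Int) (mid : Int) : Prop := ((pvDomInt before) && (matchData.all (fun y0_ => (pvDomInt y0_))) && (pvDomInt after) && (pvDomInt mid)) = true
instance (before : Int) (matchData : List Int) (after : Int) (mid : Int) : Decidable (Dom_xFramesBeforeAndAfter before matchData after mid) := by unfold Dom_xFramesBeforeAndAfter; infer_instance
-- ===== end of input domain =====

-- B replaces A's two counting while-loops by closed-form clamps (max/min arithmetic); objective: simpler.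

-- ===== PORT A =====
-- 'i = 1; while i < before: if mid-(i+1) >= 0: i += 1 else: break' — recursion on the loop
-- counter with fuel (before - i).toNat (exact: when fuel is 0, i >= before, as the loop test fails)
def pvLoopBefore (before mid : Int) : Nat → Int → Int
  | 0, i => i
  | fuel+1, i =>
    if i < before then
      (if mid - (i + 1) ≥ 0 then pvLoopBefore before mid fuel (i + 1) else i)
    else i

-- 'i = 1; while i < after: if mid + i <= len(matchData)-1: i += 1 else: break'
def pvLoopAfter (after len mid : Int) : Nat → Int → Int
  | 0, i => i
  | fuel+1, i =>
    if i < after then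
      (if mid + i ≤ len - 1 then pvLoopAfter after len mid fuel (i + 1) else i)
    else i

def xFramesBeforeAndAfter (before : Int) (matchData : List Int) (after : Int) (mid : Int) : List Int :=
  let before' := pvLoopBefore before mid (before - 1).toNat 1
  let after' := pvLoopAfter after (matchData.length : Int) mid (after - 1).toNat 1
  PySem.List.slice matchData (some (mid - before')) (some (mid + after'))

-- ===== PORT B =====
def xFramesBeforeAndAfter_alt (before : Int) (matchData : List Int) (after : Int) (mid : Int) : List Int :=
  let b := max 1 (min before mid)
  let a := max 1 (min after ((matchData.length : Int) - mid))
  PySem.List.slice matchData (some (mid - b)) (some (mid + a))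

-- ===== PRECONDITION & SPEC =====
def Spec_xFramesBeforeAndAfter (before : Int) (matchData : List Int) (after : Int) (mid : Int) (out : List Int) : Prop := out = xFramesBeforeAndAfter_alt before matchData after mid
instance (before : Int) (matchData : List Int) (after : Int) (mid : Int) (out : List Int) : Decidable (Spec_xFramesBeforeAndAfter before matchData after mid out) := by unfold Spec_xFramesBeforeAndAfter; infer_instance

-- ===== CLAIM (what is proved, stated in full; the proofs are below) =====
def Claim_equal_xFramesBeforeAndAfter : Prop := ∀ (before : Int) (matchData : List Int) (after : Int) (mid : Int), Dom_xFramesBeforeAndAfter before matchData after mid → Spec_xFramesBeforeAndAfter before matchData after mid (xFramesBeforeAndAfter before matchData after mid)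

-- ===== LEMMAS AND PROOFS =====
theorem pvLoopBefore_eq (before mid : Int) (fuel : Nat) (i : Int) (hi : 1 ≤ i)
    (hf : fuel = (before - i).toNat) :
    pvLoopBefore before mid fuel i = max i (min before mid) := by
  induction fuel generalizing i with
  | zero => simp only [pvLoopBefore]; omega
  | succ n ih =>
    simp only [pvLoopBefore]
    by_cases h : i < before
    · rw [if_pos h]
      by_cases h2 : mid - (i + 1) ≥ 0
      · rw [if_pos h2, ih (i+1) (by omega) (by omega)]; omega
      · rw [if_neg h2]; omega
    · rw [if_neg h]; omega

theorem pvLoopAfter_eq (after len mid : Int) (fuel : Nat) (i : Int) (hi : 1 ≤ i)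
    (hf : fuel = (after - i).toNat) :
    pvLoopAfter after len mid fuel i = max i (min after (len - mid)) := by
  induction fuel generalizing i with
  | zero => simp only [pvLoopAfter]; omega
  | succ n ih =>
    simp only [pvLoopAfter]
    by_cases h : i < after
    · rw [if_pos h]
      by_cases h2 : mid + i ≤ len - 1
      · rw [if_pos h2, ih (i+1) (by omega) (by omega)]; omega
      · rw [if_neg h2]; omega
    · rw [if_neg h]; omega

-- ===== VERDICT (by name: the statement is the Claim_ definition above) =====
theorem xFramesBeforeAndAfter_spec : Claim_equal_xFramesBeforeAndAfter := by
  intro before matchData after mid _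
  unfold Spec_xFramesBeforeAndAfter xFramesBeforeAndAfter xFramesBeforeAndAfter_alt
  rw [pvLoopBefore_eq before mid (before - 1).toNat 1 le_rfl (by omega),
      pvLoopAfter_eq after (matchData.length : Int) mid (after - 1).toNat 1 le_rfl (by omega)]
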